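-- pv_equiv track=rewrite | github.com/jcolinpatrick/kryptos | scripts/e_route_definitive.py | gen_column_major
-- ===== SOURCE A (Python) =====
-- def read_order_to_perm(grid, nrows, ncols, cell_order):
--     """Convert a reading order to a permutation (output[i] = input[perm[i]])."""
--     perm = []
--     for r, c in cell_order:
--         if 0 <= r < nrows and 0 <= c < ncols:
--             val = grid[r][c]
--             if val >= 0:
--                 perm.append(val)
--     return perm
--
-- def gen_column_major(grid, nrows, width, reverse_cols=False, reverse_rows=False):
--     """Column-major reading with optional reversals."""
--     order = []
--     col_range = range(width - 1, -1, -1) if reverse_cols else range(width)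
--     for c in col_range:
--         row_range = range(nrows - 1, -1, -1) if reverse_rows else range(nrows)
--         for r in row_range:
--             order.append((r, c))
--     return read_order_to_perm(grid, nrows, width, order)
-- ===== SOURCE B (Python) =====
-- def gen_column_major(grid, nrows, width, reverse_cols=False, reverse_rows=False):
--     """Column-major reading with optional reversals: single fused pass, no
--     intermediate coordinate list and no bounds check (generated indices are
--     always in range)."""
--     cols = range(width - 1, -1, -1) if reverse_cols else range(width)
--     rows = range(nrows - 1, -1, -1) if reverse_rows else range(nrows)
--     return [grid[r][c] for c in cols for r in rows if grid[r][c] >= 0]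
-- ===== Notes on version B (the rewrite author's own statement) =====
-- stated objective: simpler
-- what changed: B fuses A's two passes (build a list of (r,c) coordinates, then map-and-filter it through read_order_to_perm) into one nested comprehension that reads grid[r][c] directly, dropping the always-true bounds check and the intermediate coordinate list.
import Mathlib
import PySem

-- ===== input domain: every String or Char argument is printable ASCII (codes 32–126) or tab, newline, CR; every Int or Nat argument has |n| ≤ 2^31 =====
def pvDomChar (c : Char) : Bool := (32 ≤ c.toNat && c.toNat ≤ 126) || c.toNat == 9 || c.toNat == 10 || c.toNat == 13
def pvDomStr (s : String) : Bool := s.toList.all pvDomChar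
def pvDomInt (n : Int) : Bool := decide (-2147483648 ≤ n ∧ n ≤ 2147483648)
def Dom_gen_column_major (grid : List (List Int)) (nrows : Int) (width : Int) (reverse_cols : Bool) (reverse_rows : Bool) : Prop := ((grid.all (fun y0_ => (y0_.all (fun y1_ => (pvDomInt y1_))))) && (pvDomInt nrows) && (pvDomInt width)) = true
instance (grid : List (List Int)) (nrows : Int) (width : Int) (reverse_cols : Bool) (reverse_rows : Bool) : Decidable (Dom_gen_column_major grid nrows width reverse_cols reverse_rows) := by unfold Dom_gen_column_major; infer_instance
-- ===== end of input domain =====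

-- B fuses A's build-coordinate-list-then-map-and-filter into one nested pass reading grid[r][c] directly (objective: simpler).


-- ===== PORT A =====
def read_order_to_perm (grid : List (List Int)) (nrows : Int) (ncols : Int) (cell_order : List (Int × Int)) : List Int :=
  cell_order.foldl (fun perm rc =>
    if 0 ≤ rc.1 ∧ rc.1 < nrows ∧ 0 ≤ rc.2 ∧ rc.2 < ncols then
      let val := PySem.List.pyGetD (PySem.List.pyGetD grid rc.1 []) rc.2 0
      if 0 ≤ val then perm ++ [val] else perm
    else perm) []

def gen_column_major (grid : List (List Int)) (nrows : Int) (width : Int) (reverse_cols : Bool) (reverse_rows : Bool) : List Int :=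
  let col_range := if reverse_cols then PySem.List.pyRange (width - 1) (-1) (-1) else PySem.List.pyRange 0 width 1
  let order := col_range.foldl (fun order c =>
    let row_range := if reverse_rows then PySem.List.pyRange (nrows - 1) (-1) (-1) else PySem.List.pyRange 0 nrows 1
    row_range.foldl (fun order r => order ++ [(r, c)]) order) []
  read_order_to_perm grid nrows width order

-- ===== PORT B =====
def gen_column_major_alt (grid : List (List Int)) (nrows : Int) (width : Int) (reverse_cols : Bool) (reverse_rows : Bool) : List Int :=
  let cols := if reverse_cols then PySem.List.pyRange (width - 1) (-1) (-1) else PySem.List.pyRange 0 width 1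
  cols.flatMap (fun c =>
    (if reverse_rows then PySem.List.pyRange (nrows - 1) (-1) (-1) else PySem.List.pyRange 0 nrows 1).filterMap (fun r =>
    let v := PySem.List.pyGetD (PySem.List.pyGetD grid r []) c 0
    if 0 ≤ v then some v else none))

-- ===== PRECONDITION & SPEC =====
-- Pre_ excludes exactly the inputs on which Python A raises IndexError: a positive
-- reading window whose coordinates reach past grid's rows or past a row's length.
def Pre_gen_column_major (grid : List (List Int)) (nrows : Int) (width : Int) (reverse_cols : Bool) (reverse_rows : Bool) : Prop :=
  0 < nrows → 0 < width →
    (nrows ≤ (grid.length : Int) ∧ ∀ row ∈ grid.take nrows.toNat, width ≤ (row.length : Int))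
instance (grid : List (List Int)) (nrows : Int) (width : Int) (reverse_cols : Bool) (reverse_rows : Bool) : Decidable (Pre_gen_column_major grid nrows width reverse_cols reverse_rows) := by unfold Pre_gen_column_major; infer_instance

def pvWitness_gen_column_major : List (List Int) × Int × Int × Bool × Bool := ([[0, -1], [2, 3]], 2, 2, false, false)

def Spec_gen_column_major (grid : List (List Int)) (nrows : Int) (width : Int) (reverse_cols : Bool) (reverse_rows : Bool) (out : List Int) : Prop := out = gen_column_major_alt grid nrows width reverse_cols reverse_rows
instance (grid : List (List Int)) (nrows : Int) (width : Int) (reverse_cols : Bool) (reverse_rows : Bool) (out : List Int) : Decidable (Spec_gen_column_major grid nrows width reverse_cols reverse_rows out) := by unfold Spec_gen_column_major; infer_instance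

-- ===== CLAIM (what is proved, stated in full; the proofs are below) =====
def Claim_equal_gen_column_major : Prop := ∀ (grid : List (List Int)) (nrows : Int) (width : Int) (reverse_cols : Bool) (reverse_rows : Bool), Dom_gen_column_major grid nrows width reverse_cols reverse_rows → Pre_gen_column_major grid nrows width reverse_cols reverse_rows → Spec_gen_column_major grid nrows width reverse_cols reverse_rows (gen_column_major grid nrows width reverse_cols reverse_rows)

-- ===== LEMMAS AND PROOFS =====

-- A's accumulator loop over the coordinate list is a filterMap.
theorem rotp_filterMap (grid : List (List Int)) (nrows ncols : Int) (l : List (Int × Int)) (acc : List Int) :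
    l.foldl (fun perm rc =>
      if 0 ≤ rc.1 ∧ rc.1 < nrows ∧ 0 ≤ rc.2 ∧ rc.2 < ncols then
        let val := PySem.List.pyGetD (PySem.List.pyGetD grid rc.1 []) rc.2 0
        if 0 ≤ val then perm ++ [val] else perm
      else perm) acc
    = acc ++ l.filterMap (fun rc =>
        if 0 ≤ rc.1 ∧ rc.1 < nrows ∧ 0 ≤ rc.2 ∧ rc.2 < ncols then
          (let val := PySem.List.pyGetD (PySem.List.pyGetD grid rc.1 []) rc.2 0
           if 0 ≤ val then some val else none)
        else none) := by
  induction l generalizing acc with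
  | nil => simp
  | cons x xs ih =>
    simp only [List.foldl_cons, List.filterMap_cons]
    split_ifs with h1 h2 <;> simp [ih]

-- Members of either row/column range lie in [0, n).
theorem mem_range_bounds (n x : Int) (rev : Bool)
    (h : x ∈ (if rev then PySem.List.pyRange (n - 1) (-1) (-1) else PySem.List.pyRange 0 n 1)) :
    0 ≤ x ∧ x < n := by
  cases rev <;>
    simp only [Bool.false_eq_true, if_true, if_false,
      PySem.List.mem_pyRange_one, PySem.List.mem_pyRange_neg_one] at h <;>
  omega

theorem gen_column_major_eq (grid : List (List Int)) (nrows width : Int) (reverse_cols reverse_rows : Bool) :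
    gen_column_major grid nrows width reverse_cols reverse_rows
      = gen_column_major_alt grid nrows width reverse_cols reverse_rows := by
  unfold gen_column_major gen_column_major_alt read_order_to_perm
  simp only [PySem.List.foldl_append_singleton_eq_map, PySem.List.foldl_append_eq_flatMap,
    List.nil_append, rotp_filterMap, List.filterMap_flatMap, List.filterMap_map]
  refine List.flatMap_congr (fun c hc => ?_)
  refine List.filterMap_congr (fun r hr => ?_)
  have hcb := mem_range_bounds width c reverse_cols hc
  have hrb := mem_range_bounds nrows r reverse_rows hr
  simp only [Function.comp]
  rw [if_pos ⟨hrb.1, hrb.2, hcb.1, hcb.2⟩]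

-- ===== VERDICT (by name: the statement is the Claim_ definition above) =====
theorem gen_column_major_spec : Claim_equal_gen_column_major := by
  intro grid nrows width rc rr _ _
  unfold Spec_gen_column_major
  exact gen_column_major_eq grid nrows width rc rr
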